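-- pv_equiv track=rewrite | github.com/RamiIssa2/Data_Security_Project-SDES_Encryption | Code/helper_functions.py | convert_text_to_binary
-- ===== SOURCE A (Python) =====
-- def convert_text_to_binary(message):
--     temp, res = [], []
--     for letter in message:
--         temp.append(format(ord(letter), '08b'))
--     for i in temp:
--         for r in i:
--             res.append(int(r))
--
--     res = [res[i: i + 12] for i in range(0, len(res), 12)]
--     final_res = []
--     for rs in res:
--         tmp_res = []
--         for r in rs:
--             tmp_res.append(r)
--         for i in range(12 - len(rs)):
--             tmp_res.append(0)
--         final_res.append(tmp_res)
--
--     return final_res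
-- ===== SOURCE B (Python) =====
-- def _bits12(v):
--     return [v >> k & 1 for k in range(11, -1, -1)]
--
--
-- def convert_text_to_binary(message):
--     res = []
--     i, n = 0, len(message)
--     while i + 3 <= n:
--         N = ord(message[i]) * 65536 + ord(message[i + 1]) * 256 + ord(message[i + 2])
--         hi, lo = divmod(N, 4096)
--         res.append(_bits12(hi))
--         res.append(_bits12(lo))
--         i += 3
--     if n - i == 2:
--         N = ord(message[i]) * 256 + ord(message[i + 1])
--         res.append(_bits12(N // 16))
--         res.append(_bits12(N % 16 * 256))
--     elif n - i == 1:
--         res.append(_bits12(ord(message[i]) * 16))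
--     return res
-- ===== Notes on version B (the rewrite author's own statement) =====
-- stated objective: alternative
-- what changed: B never builds a flat bit list: it packs each group of 3 characters into one 24-bit integer with multiply/add, splits it with divmod(N, 4096) into two 12-bit numbers emitted directly as bit rows, and handles the 1- or 2-character tail with the matching shifts (N*16, N//16 and N%16*256), replacing A's format-to-string/reparse, flatten, slice-into-windows and pad-each-chunk passes.
import Mathlib
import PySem

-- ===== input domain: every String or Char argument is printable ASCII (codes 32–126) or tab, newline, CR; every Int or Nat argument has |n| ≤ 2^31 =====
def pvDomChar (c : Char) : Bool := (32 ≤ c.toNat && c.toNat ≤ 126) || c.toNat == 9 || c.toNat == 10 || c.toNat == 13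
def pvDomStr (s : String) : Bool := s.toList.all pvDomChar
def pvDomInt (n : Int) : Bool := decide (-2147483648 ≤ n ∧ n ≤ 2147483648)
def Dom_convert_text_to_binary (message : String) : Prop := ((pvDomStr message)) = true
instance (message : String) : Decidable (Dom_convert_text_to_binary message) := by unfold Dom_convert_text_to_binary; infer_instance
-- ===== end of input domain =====

-- B packs each group of 3 characters into one 24-bit integer and splits it with divmod into
-- two 12-bit numbers whose bits are emitted directly — no flat bit stream, no per-chunk
-- padding loops (objective: alternative).

-- ===== PORT A =====
-- format(n, '08b') for n ≥ 0: binary digits left-padded with '0' to width 8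
-- (exact for 0 ≤ n; Dom guarantees character codes ≤ 126 < 256 so the width is exactly 8)
def pvFmt08b (n : Int) : List Char :=
  List.replicate (8 - (PySem.Int.toBinChars n).length) '0' ++ PySem.Int.toBinChars n

def convert_text_to_binary (message : String) : List (List Int) :=
  let temp : List (List Char) :=
    message.toList.foldl (fun temp letter => temp ++ [pvFmt08b (letter.toNat : Int)]) []
  -- int(r) on a single binary-digit char r is exactly r.toNat - 48
  let res : List Int :=
    temp.foldl (fun res i => i.foldl (fun res r => res ++ [((r.toNat : Int) - 48)]) res) []
  let res2 : List (List Int) :=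
    (PySem.List.pyRange 0 (res.length : Int) 12).map
      (fun i => PySem.List.slice res (some i) (some (i + 12)))
  res2.foldl (fun final_res rs =>
    let tmp_res := rs.foldl (fun t r => t ++ [r]) []
    let tmp_res := (PySem.List.pyRange 0 (12 - (rs.length : Int)) 1).foldl
      (fun t _ => t ++ [(0 : Int)]) tmp_res
    final_res ++ [tmp_res]) []

-- ===== PORT B =====
-- _bits12(v): [v >> k & 1 for k in range(11, -1, -1)]  (v ≥ 0 here, so Nat shifts are exact)
def pvBits12 (v : Nat) : List Int :=
  (PySem.List.pyRange 11 (-1) (-1)).map (fun k => (((v >>> k.toNat) &&& 1 : Nat) : Int))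

-- B's while loop consumes 3 characters per iteration; ported as the same recursion on the
-- remaining characters, with the two short-tail cases of the trailing if/elif.
def pvGoB : List Char → List (List Int)
  | a :: b :: c :: rest =>
      let N := a.toNat * 65536 + b.toNat * 256 + c.toNat
      pvBits12 (N / 4096) :: pvBits12 (N % 4096) :: pvGoB rest
  | [a, b] =>
      let N := a.toNat * 256 + b.toNat
      [pvBits12 (N / 16), pvBits12 (N % 16 * 256)]
  | [a] => [pvBits12 (a.toNat * 16)]
  | [] => []

def convert_text_to_binary_alt (message : String) : List (List Int) :=
  pvGoB message.toList

-- ===== PRECONDITION & SPEC =====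
def Spec_convert_text_to_binary (message : String) (out : List (List Int)) : Prop := out = convert_text_to_binary_alt message
instance (message : String) (out : List (List Int)) : Decidable (Spec_convert_text_to_binary message out) := by unfold Spec_convert_text_to_binary; infer_instance

-- ===== CLAIM (what is proved, stated in full; the proofs are below) =====
def Claim_equal_convert_text_to_binary : Prop := ∀ (message : String), Dom_convert_text_to_binary message → Spec_convert_text_to_binary message (convert_text_to_binary message)

-- ===== LEMMAS AND PROOFS =====

-- big-endian w-bit representation of v (proof-side reference object)
def pvBitsN (w v : Nat) : List Int :=
  (List.range w).map (fun k => (((v >>> (w - 1 - k)) % 2 : Nat) : Int))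

-- A's chunk/pad stage, after its foldls are flattened: slice into 12-windows, pad each
def pvMSP (l : List Int) : List (List Int) :=
  ((PySem.List.pyRange 0 (l.length : Int) 12).map
      (fun i => PySem.List.slice l (some i) (some (i + 12)))).map
    (fun rs => rs ++ List.replicate ((12 - (rs.length : Int)).toNat) 0)

theorem pvBitsN_length (w v : Nat) : (pvBitsN w v).length = w := by simp [pvBitsN]

theorem pv_bit_high (w2 s hi lo : Nat) (hlo : lo < 2 ^ w2) :
    (hi * 2 ^ w2 + lo) >>> (s + w2) = hi >>> s := by
  rw [Nat.shiftRight_eq_div_pow, Nat.shiftRight_eq_div_pow, add_comm s w2, pow_add,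
    ← Nat.div_div_eq_div_mul, mul_comm hi (2 ^ w2), Nat.mul_add_div (Nat.two_pow_pos w2),
    Nat.div_eq_of_lt hlo, add_zero]

theorem pv_bit_low (w2 s hi lo : Nat) (hs : s < w2) :
    ((hi * 2 ^ w2 + lo) >>> s) % 2 = (lo >>> s) % 2 := by
  rw [Nat.shiftRight_eq_div_pow, Nat.shiftRight_eq_div_pow]
  have h : hi * 2 ^ w2 + lo = 2 ^ s * (hi * (2 * 2 ^ (w2 - s - 1))) + lo := by
    have : 2 ^ w2 = 2 ^ s * (2 * 2 ^ (w2 - s - 1)) := by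
      rw [show 2 * 2 ^ (w2 - s - 1) = 2 ^ (w2 - s - 1 + 1) by rw [pow_succ]; ring,
        ← pow_add]
      congr 1; omega
    rw [this]; ring
  rw [h, Nat.mul_add_div (Nat.two_pow_pos s),
    show hi * (2 * 2 ^ (w2 - s - 1)) = 2 * (hi * 2 ^ (w2 - s - 1)) by ring,
    Nat.mul_add_mod]

theorem pvBitsN_append (w1 w2 hi lo : Nat) (hlo : lo < 2 ^ w2) :
    pvBitsN (w1 + w2) (hi * 2 ^ w2 + lo) = pvBitsN w1 hi ++ pvBitsN w2 lo := by
  unfold pvBitsN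
  rw [List.range_add, List.map_append, List.map_map]
  congr 1
  · apply List.map_congr_left; intro k hk; rw [List.mem_range] at hk
    rw [show w1 + w2 - 1 - k = (w1 - 1 - k) + w2 by omega, pv_bit_high w2 (w1 - 1 - k) hi lo hlo]
  · apply List.map_congr_left; intro k hk; rw [List.mem_range] at hk
    simp only [Function.comp]
    rw [show w1 + w2 - 1 - (w1 + k) = w2 - 1 - k by omega,
      pv_bit_low w2 (w2 - 1 - k) hi lo (by omega)]

theorem pvBitsN_split (w1 w2 v : Nat) :
    pvBitsN (w1 + w2) v = pvBitsN w1 (v / 2 ^ w2) ++ pvBitsN w2 (v % 2 ^ w2) := by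
  conv_lhs => rw [← Nat.div_add_mod v (2 ^ w2), mul_comm (2 ^ w2) (v / 2 ^ w2)]
  exact pvBitsN_append w1 w2 _ _ (Nat.mod_lt _ (Nat.two_pow_pos w2))

theorem pvBits12_eq (v : Nat) : pvBits12 v = pvBitsN 12 v := by
  have h1 : PySem.List.pyRange 11 (-1) (-1) = [11, 10, 9, 8, 7, 6, 5, 4, 3, 2, 1, 0] := by decide
  have h2 : List.range 12 = [0, 1, 2, 3, 4, 5, 6, 7, 8, 9, 10, 11] := by decide
  simp [pvBits12, pvBitsN, h1, h2, Nat.and_one_is_mod]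

theorem pvMSP_nil : pvMSP [] = [] := by decide

-- one padded 12-window of l, starting at position 12*k
def pvChunk (l : List Int) (k : Nat) : List Int :=
  (l.drop (12 * k)).take 12
    ++ List.replicate ((12 - (((l.drop (12 * k)).take 12).length : Int)).toNat) 0

theorem pvMSP_eq (l : List Int) :
    pvMSP l = (List.range ((l.length + 11) / 12)).map (pvChunk l) := by
  unfold pvMSP pvChunk
  rw [PySem.List.pyRange_of_pos 0 (l.length : Int) (by norm_num : (0:Int) < 12)]
  have hc : (if (0:Int) < (l.length : Int) then (((l.length : Int) - 0 + 12 - 1) / 12).toNat else 0)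
      = (l.length + 11) / 12 := by
    by_cases hp : 0 < l.length
    · rw [if_pos (by exact_mod_cast hp)]; omega
    · rw [if_neg (by omega)]; omega
  rw [hc]
  simp only [List.map_map]
  apply List.map_congr_left
  intro k hk
  simp only [Function.comp]
  have h1 : ((0:Int) + 12 * (k : Int)) = ((12 * k : Nat) : Int) := by push_cast; ring
  rw [h1, show ((12 * k : Nat) : Int) + 12 = ((12 * k : Nat) : Int) + ((12 : Nat) : Int) by norm_num,
    PySem.List.slice_natCast_add]

theorem pvMSP_cons (l : List Int) (h : l ≠ []) :
    pvMSP l = pvChunk l 0 :: pvMSP (l.drop 12) := by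
  rw [pvMSP_eq, pvMSP_eq]
  have hm : 0 < l.length := List.length_pos_of_ne_nil h
  have hcount : (l.length + 11) / 12 = ((l.drop 12).length + 11) / 12 + 1 := by
    simp only [List.length_drop]; omega
  rw [hcount, List.range_succ_eq_map, List.map_cons, List.map_map]
  congr 1
  apply List.map_congr_left
  intro k hk
  simp only [Function.comp, pvChunk, List.drop_drop, Nat.succ_eq_add_one]
  rw [show 12 + 12 * k = 12 * (k + 1) by ring]

theorem pvBitsN_ne_nil (w v : Nat) (hw : 0 < w) : pvBitsN w v ≠ [] := by
  intro hnil
  have := pvBitsN_length w v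
  rw [hnil] at this
  simp at this
  omega

theorem pv_chunk_full (X T : List Int) (hX : X.length = 12) :
    pvChunk (X ++ T) 0 = X := by
  unfold pvChunk
  rw [Nat.mul_zero, List.drop_zero, List.take_left' hX, hX]
  simp

theorem pv_chunk_short (X : List Int) (hX : X.length ≤ 12) :
    pvChunk X 0 = X ++ List.replicate ((12 - (X.length : Int)).toNat) 0 := by
  unfold pvChunk
  rw [Nat.mul_zero, List.drop_zero, List.take_of_length_le hX]

theorem pvBits8_0 : pvBitsN 8 0 = List.replicate 8 0 := by decide
theorem pvBits4_0 : pvBitsN 4 0 = List.replicate 4 0 := by decide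

theorem pv_comb88 (x y : Nat) (hy : y < 256) :
    pvBitsN 8 x ++ pvBitsN 8 y = pvBitsN 16 (x * 256 + y) := by
  have h := pvBitsN_append 8 8 x y (by norm_num [hy])
  norm_num at h
  exact h.symm

theorem pv_comb8_16 (x y : Nat) (hy : y < 65536) :
    pvBitsN 8 x ++ pvBitsN 16 y = pvBitsN 24 (x * 65536 + y) := by
  have h := pvBitsN_append 8 16 x y (by norm_num [hy])
  norm_num at h
  exact h.symm

theorem pv_comb84 (x y : Nat) (hy : y < 16) :
    pvBitsN 8 x ++ pvBitsN 4 y = pvBitsN 12 (x * 16 + y) := by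
  have h := pvBitsN_append 8 4 x y (by norm_num [hy])
  norm_num at h
  exact h.symm

theorem pv_comb48 (x y : Nat) (hy : y < 256) :
    pvBitsN 4 x ++ pvBitsN 8 y = pvBitsN 12 (x * 256 + y) := by
  have h := pvBitsN_append 4 8 x y (by norm_num [hy])
  norm_num at h
  exact h.symm

theorem pv_split1212 (v : Nat) :
    pvBitsN 24 v = pvBitsN 12 (v / 4096) ++ pvBitsN 12 (v % 4096) := by
  have h := pvBitsN_split 12 12 v
  norm_num at h
  exact h

theorem pv_split124 (v : Nat) :
    pvBitsN 16 v = pvBitsN 12 (v / 16) ++ pvBitsN 4 (v % 16) := by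
  have h := pvBitsN_split 12 4 v
  norm_num at h
  exact h

-- three 8-bit characters = one 24-bit number = two 12-bit chunks
theorem pv_stream3 (x y z : Nat) (hy : y < 256) (hz : z < 256) (S : List Int) :
    pvBitsN 8 x ++ (pvBitsN 8 y ++ (pvBitsN 8 z ++ S))
      = pvBitsN 12 ((x * 65536 + y * 256 + z) / 4096)
          ++ (pvBitsN 12 ((x * 65536 + y * 256 + z) % 4096) ++ S) := by
  rw [show pvBitsN 8 x ++ (pvBitsN 8 y ++ (pvBitsN 8 z ++ S))
        = (pvBitsN 8 x ++ (pvBitsN 8 y ++ pvBitsN 8 z)) ++ S by simp [List.append_assoc]]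
  rw [pv_comb88 y z hz, pv_comb8_16 x (y * 256 + z) (by omega),
    show x * 65536 + (y * 256 + z) = x * 65536 + y * 256 + z by ring,
    pv_split1212, List.append_assoc]

theorem pvGoB_eq : ∀ (chars : List Char), (∀ c ∈ chars, c.toNat < 256) →
    pvGoB chars = pvMSP (chars.flatMap (fun c => pvBitsN 8 c.toNat)) := by
  intro chars
  induction chars using pvGoB.induct with
  | case1 a b c rest ih =>
    intro h
    have hb : b.toNat < 256 := h b (by simp)
    have hc : c.toNat < 256 := h c (by simp)
    simp only [List.flatMap_cons]
    rw [pv_stream3 a.toNat b.toNat c.toNat hb hc,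
      pvMSP_cons _ (by simp [pvBitsN]),
      pv_chunk_full _ _ (pvBitsN_length _ _), List.drop_left' (pvBitsN_length _ _),
      pvMSP_cons _ (by simp [pvBitsN]),
      pv_chunk_full _ _ (pvBitsN_length _ _), List.drop_left' (pvBitsN_length _ _),
      ← ih (fun c hcm => h c (by simp [hcm]))]
    simp [pvGoB, pvBits12_eq]
  | case2 a b =>
    intro h
    have hb : b.toNat < 256 := h b (by simp)
    simp only [List.flatMap_cons, List.flatMap_nil, List.append_nil]
    rw [pv_comb88 a.toNat b.toNat hb, pv_split124,
      pvMSP_cons _ (by simp [pvBitsN]),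
      pv_chunk_full _ _ (pvBitsN_length _ _), List.drop_left' (pvBitsN_length _ _),
      pvMSP_cons _ (pvBitsN_ne_nil 4 _ (by norm_num)),
      pv_chunk_short _ (by rw [pvBitsN_length]; norm_num),
      List.drop_eq_nil_of_le (by rw [pvBitsN_length]; norm_num), pvMSP_nil,
      pvBitsN_length]
    rw [show ((12 - ((4 : Nat) : Int)).toNat) = 8 by decide, ← pvBits8_0,
      pv_comb48 _ 0 (by norm_num), Nat.add_zero]
    simp [pvGoB, pvBits12_eq]
  | case3 a =>
    intro h
    simp only [List.flatMap_cons, List.flatMap_nil, List.append_nil]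
    rw [pvMSP_cons _ (pvBitsN_ne_nil 8 _ (by norm_num)),
      pv_chunk_short _ (by rw [pvBitsN_length]; norm_num),
      List.drop_eq_nil_of_le (by rw [pvBitsN_length]; norm_num), pvMSP_nil,
      pvBitsN_length]
    rw [show ((12 - ((8 : Nat) : Int)).toNat) = 4 by decide, ← pvBits4_0,
      pv_comb84 _ 0 (by norm_num), Nat.add_zero]
    simp [pvGoB, pvBits12_eq]
  | case4 =>
    intro h
    simp [pvGoB, pvMSP_nil]

-- foldl appending a block per step is flatMap
theorem pv_foldl_append {α β : Type} (f : α → List β) :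
    ∀ (l : List α) (acc : List β), l.foldl (fun a x => a ++ f x) acc = acc ++ l.flatMap f := by
  intro l
  induction l with
  | nil => simp [List.foldl]
  | cons x xs ih => intro acc; rw [List.foldl_cons, ih]; simp

theorem pv_flatMap_single {α β : Type} (g : α → β) (l : List α) :
    l.flatMap (fun x => [g x]) = l.map g := by
  induction l with
  | nil => simp
  | cons x xs ih => simp [ih]

theorem pv_map_id {α : Type} (l : List α) : l.map (fun x => x) = l := by
  induction l with
  | nil => simp
  | cons x xs ih => simp [ih]

theorem pv_map_const {α β : Type} (z : β) (l : List α) :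
    l.map (fun _ => z) = List.replicate l.length z := by
  induction l with
  | nil => simp
  | cons x xs ih => simp [ih, List.replicate_succ]

-- per character: A's formatted digits reparsed as ints = the 8-bit big-endian representation
set_option maxRecDepth 10000 in
theorem pv_char_bits (n : Nat) (hn : n < 256) :
    (pvFmt08b (n : Int)).map (fun r => ((r.toNat : Int) - 48)) = pvBitsN 8 n := by
  revert hn; revert n; decide

theorem pv_flatMap_congr_dom {β : Type} (f g : Char → List β)
    (h : ∀ c : Char, pvDomChar c = true → f c = g c) :
    ∀ (l : List Char), l.all pvDomChar = true → l.flatMap f = l.flatMap g := by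
  intro l
  induction l with
  | nil => simp
  | cons c cs ih =>
    intro hall
    simp only [List.all_cons, Bool.and_eq_true] at hall
    simp [List.flatMap_cons, h c hall.1, ih hall.2]

-- ===== VERDICT (by name: the statement is the Claim_ definition above) =====
theorem convert_text_to_binary_spec : Claim_equal_convert_text_to_binary := by
  intro message hdom
  unfold Spec_convert_text_to_binary convert_text_to_binary convert_text_to_binary_alt
  simp only [pv_foldl_append, pv_flatMap_single, List.nil_append,
    pv_map_id, pv_map_const, PySem.List.length_pyRange_one, Int.sub_zero,
    List.flatMap_map]
  have hbits :
      message.toList.flatMap (fun c => (pvFmt08b ((c.toNat : Int))).map (fun r => ((r.toNat : Int) - 48)))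
        = message.toList.flatMap (fun c => pvBitsN 8 c.toNat) := by
    apply pv_flatMap_congr_dom
    · intro c hc
      have h256 : c.toNat < 256 := by
        simp [pvDomChar] at hc
        omega
      exact pv_char_bits c.toNat h256
    · exact hdom
  rw [hbits]
  have hchars : ∀ c ∈ message.toList, c.toNat < 256 := by
    intro c hcm
    have := List.all_eq_true.mp hdom c hcm
    simp [pvDomChar] at this
    omega
  rw [pvGoB_eq message.toList hchars]
  unfold pvMSP
  simp only [List.map_map, Function.comp_def]
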